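-- pv_equiv track=rewrite | github.com/slavvc/spam | program/my_clf.py | add_counters
-- ===== SOURCE A (Python) =====
-- def add_counters(c1, c2):
--     res = {}
--     for k, v in c1.items():
--         res[k] = v
--     for k, v in c2.items():
--         if k in res:
--             res[k] += v
--         else:
--             res[k]  = v
--     return res
-- ===== SOURCE B (Python) =====
-- def add_counters(c1, c2):
--     pairs = list(c1.items()) + list(c2.items())
--     res = {}
--     while pairs:
--         k = pairs[0][0]
--         res[k] = sum(v2 for k2, v2 in pairs if k2 == k)
--         pairs = [(k2, v2) for k2, v2 in pairs if k2 != k]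
--     return res
-- ===== Notes on version B (the rewrite author's own statement) =====
-- stated objective: alternative
-- what changed: Instead of A's accumulator dict with a present/absent branch per c2 item, B concatenates both item lists and repeatedly extracts the first remaining key, summing all its occurrences in one scan and filtering them out (selection-style group-and-sum).
import Mathlib
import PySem

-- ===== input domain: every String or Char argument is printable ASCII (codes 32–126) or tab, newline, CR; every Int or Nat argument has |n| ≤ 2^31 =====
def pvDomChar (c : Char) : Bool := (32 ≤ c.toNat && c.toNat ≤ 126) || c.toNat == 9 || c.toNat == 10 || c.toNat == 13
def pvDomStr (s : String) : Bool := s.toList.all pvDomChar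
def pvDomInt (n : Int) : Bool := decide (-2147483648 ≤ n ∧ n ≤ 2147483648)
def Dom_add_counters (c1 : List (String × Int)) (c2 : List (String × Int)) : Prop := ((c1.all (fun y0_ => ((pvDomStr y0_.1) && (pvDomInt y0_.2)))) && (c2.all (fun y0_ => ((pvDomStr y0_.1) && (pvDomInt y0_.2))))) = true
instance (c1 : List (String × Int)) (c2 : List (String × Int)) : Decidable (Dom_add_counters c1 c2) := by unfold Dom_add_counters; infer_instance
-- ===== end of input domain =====

-- B replaces A's accumulator-dict merge with a selection-style group-and-sum sweep over the
-- concatenated item list (repeatedly take the first remaining key, sum all its occurrences,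
-- drop them); alternative algorithm, no per-key presence branch, quadratic instead of linear.

-- ===== PORT A =====
-- res = {}; for k, v in c1.items(): res[k] = v
-- for k, v in c2.items(): if k in res: res[k] += v else: res[k] = v
def add_counters (c1 : List (String × Int)) (c2 : List (String × Int)) : List (String × Int) :=
  let res := c1.foldl (fun d p => d.insert p.1 p.2) (PySem.Dict.empty : PySem.Dict String Int)
  let res := c2.foldl (fun d p => if d.contains p.1 then d.modify p.1 0 (· + p.2) else d.insert p.1 p.2) res
  res.items

-- ===== PORT B =====
-- while pairs: k = pairs[0][0]; res[k] = sum(v2 for k2, v2 in pairs if k2 == k);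
--              pairs = [(k2, v2) for k2, v2 in pairs if k2 != k]
-- (the head of pairs has key k, so the sum is v + sum over the tail and the filter acts on the tail)
def pvGroupSum : List (String × Int) → PySem.Dict String Int → PySem.Dict String Int
  | [], res => res
  | (k, v) :: rest, res =>
      pvGroupSum (rest.filter (fun p => p.1 != k))
        (res.insert k (v + ((rest.filter (fun p => p.1 == k)).map Prod.snd).sum))
termination_by pairs _ => pairs.length
decreasing_by
  simp only [List.length_cons, List.length_unattach]
  exact Nat.lt_succ_of_le (le_trans (List.length_filter_le _ _) (by simp))

-- pairs = list(c1.items()) + list(c2.items()); res = {}; <loop above>; return res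
def add_counters_alt (c1 : List (String × Int)) (c2 : List (String × Int)) : List (String × Int) :=
  (pvGroupSum (c1 ++ c2) (PySem.Dict.empty : PySem.Dict String Int)).items

-- ===== PRECONDITION & SPEC =====
-- Pre_ encodes the dict invariant: both association lists have duplicate-free keys (every Python dict
-- input satisfies this; a list with duplicate keys corresponds to no Python input of A).
def Pre_add_counters (c1 : List (String × Int)) (c2 : List (String × Int)) : Prop :=
  (c1.map Prod.fst).Nodup ∧ (c2.map Prod.fst).Nodup
instance (c1 : List (String × Int)) (c2 : List (String × Int)) : Decidable (Pre_add_counters c1 c2) := by unfold Pre_add_counters; infer_instance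

def pvWitness_add_counters : (List (String × Int)) × (List (String × Int)) :=
  ([("a", 1), ("b", 2)], [("b", 3), ("c", 4)])

def Spec_add_counters (c1 : List (String × Int)) (c2 : List (String × Int)) (out : List (String × Int)) : Prop := out = add_counters_alt c1 c2
instance (c1 : List (String × Int)) (c2 : List (String × Int)) (out : List (String × Int)) : Decidable (Spec_add_counters c1 c2 out) := by unfold Spec_add_counters; infer_instance

-- ===== CLAIM (what is proved, stated in full; the proofs are below) =====
def Claim_equal_add_counters : Prop := ∀ (c1 : List (String × Int)) (c2 : List (String × Int)), Dom_add_counters c1 c2 → Pre_add_counters c1 c2 → Spec_add_counters c1 c2 (add_counters c1 c2)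

-- ===== LEMMAS AND PROOFS =====

-- A's first loop over a dict's items rebuilds that dict.
theorem pv_loop1 (c1 : List (String × Int)) (h1 : (c1.map Prod.fst).Nodup) :
    c1.foldl (fun d p => d.insert p.1 p.2) (PySem.Dict.empty : PySem.Dict String Int)
      = PySem.Dict.mk c1 := by
  apply PySem.Dict.ext
  have := PySem.Dict.items_foldl_insert_fresh (l := c1) (k := Prod.fst) (v := Prod.snd)
    (d := (PySem.Dict.empty : PySem.Dict String Int))
    (by intro a _; exact PySem.Dict.contains_empty _) h1
  simpa using this

-- A's second loop: adds the c2-sum to every existing entry (in place) and appends c2's fresh entries.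
theorem pv_loop2 (c2 : List (String × Int)) (d : PySem.Dict String Int)
    (h2 : (c2.map Prod.fst).Nodup) (hd : d.keys.Nodup) :
    (c2.foldl (fun d p => if d.contains p.1 then d.modify p.1 0 (· + p.2) else d.insert p.1 p.2) d).items
      = d.items.map (fun q => (q.1, q.2 + (PySem.Dict.mk c2).getD q.1 0))
        ++ c2.filter (fun p => !(d.contains p.1)) := by
  induction c2 generalizing d with
  | nil =>
    simp [show (PySem.Dict.mk ([] : List (String × Int))) = PySem.Dict.empty from rfl,
          PySem.Dict.getD_empty]
  | cons p rest ih =>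
    obtain ⟨k, v⟩ := p
    simp only [List.map_cons, List.nodup_cons] at h2
    obtain ⟨hp, hrest⟩ := h2
    have hrest0 : (PySem.Dict.mk rest).getD k 0 = 0 := by
      apply PySem.Dict.getD_of_not_contains
      simpa [PySem.Dict.contains_eq_decide_mem_keys, PySem.Dict.keys] using hp
    have hcons : ∀ x : String, (PySem.Dict.mk ((k, v) :: rest)).getD x 0
        = if k = x then v else (PySem.Dict.mk rest).getD x 0 := by
      intro x
      by_cases hx : k = x
      · simp [PySem.Dict.getD, PySem.Dict.get?_mk_cons, hx]
      · simp [PySem.Dict.getD, PySem.Dict.get?_mk_cons, hx]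
    simp only [List.foldl_cons]
    by_cases hc : d.contains k
    · rw [if_pos hc]
      have hdk : (d.modify k 0 (· + v)).keys.Nodup := by
        show (d.insert k (d.getD k 0 + v)).keys.Nodup
        rw [PySem.Dict.keys_insert_of_contains _ _ hc]
        exact hd
      rw [ih _ hrest hdk]
      congr 1
      · rw [show d.modify k 0 (· + v) = d.insert k (d.getD k 0 + v) from rfl,
            PySem.Dict.items_insert_of_contains _ _ hc, List.map_map]
        apply List.map_congr_left
        intro q hq
        obtain ⟨qk, qv⟩ := q
        have hqv : d.getD qk 0 = qv := PySem.Dict.getD_of_mem_items _ hq hd 0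
        by_cases hk : qk = k
        · subst hk
          simp [Function.comp, hcons, hrest0, hqv]
        · simp [Function.comp, hcons, Ne.symm hk,
                show (qk == k) = false from by simpa using hk]
      · rw [List.filter_cons]
        rw [if_neg (by simp; all_goals exact hc)]
        apply List.filter_congr
        intro q hq
        obtain ⟨qk, qv⟩ := q
        show (!(d.modify k 0 (· + v)).contains qk) = (!d.contains qk)
        rw [show (d.modify k 0 (· + v)).contains qk
              = (d.insert k (d.getD k 0 + v)).contains qk from rfl,
            PySem.Dict.contains_insert]
        by_cases hqk : qk = k
        · subst hqk; simp [hc]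
        · simp [show (qk == k) = false from by simpa using hqk]
    · rw [if_neg hc]
      have hkeys : (d.insert k v).keys.Nodup := by
        rw [PySem.Dict.keys_insert_of_not_contains _ _ (by simpa using hc)]
        refine List.Nodup.append hd (List.nodup_singleton _) ?_
        intro a ha hb
        simp at hb
        subst hb
        simp [PySem.Dict.contains_eq_decide_mem_keys] at hc
        exact hc ha
      rw [ih _ hrest hkeys]
      rw [PySem.Dict.items_insert_of_not_contains _ _ (by simpa using hc), List.map_append]
      have hpk : ∀ q ∈ d.items, q.1 ≠ k := by
        intro q hq hkq
        have hmem : q.1 ∈ d.keys := PySem.Dict.mem_keys_of_mem_items _ hq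
        simp [PySem.Dict.contains_eq_decide_mem_keys] at hc
        exact hc (hkq ▸ hmem)
      rw [List.filter_cons]
      rw [if_pos (by simp [hc])]
      have hmap : d.items.map (fun q => (q.1, q.2 + (PySem.Dict.mk rest).getD q.1 0))
          = d.items.map (fun q => (q.1, q.2 + (PySem.Dict.mk ((k, v) :: rest)).getD q.1 0)) := by
        apply List.map_congr_left
        intro q hq
        have hne := hpk q hq
        simp [hcons, Ne.symm hne]
      have hfilter : rest.filter (fun q => !((d.insert k v).contains q.1))
          = rest.filter (fun q => !(d.contains q.1)) := by
        apply List.filter_congr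
        intro q hq
        have hqne : q.1 ≠ k := by
          intro h
          exact hp (h ▸ (List.mem_map.mpr ⟨q, hq, rfl⟩))
        show (!(d.insert k v).contains q.1) = (!d.contains q.1)
        rw [PySem.Dict.contains_insert]
        simp [show (q.1 == k) = false from by simpa using hqne]
      rw [hmap, hfilter]
      simp [hcons, hrest0]

-- The values of a duplicate-free list carrying key k sum to the dict lookup at k.
theorem pv_sum_getD (k : String) (l : List (String × Int)) (h : (l.map Prod.fst).Nodup) :
    ((l.filter (fun p => p.1 == k)).map Prod.snd).sum = (PySem.Dict.mk l).getD k 0 := by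
  induction l with
  | nil => simp [show (PySem.Dict.mk ([] : List (String × Int))) = PySem.Dict.empty from rfl,
                 PySem.Dict.getD_empty]
  | cons p rest ih =>
    obtain ⟨k', v'⟩ := p
    simp only [List.map_cons, List.nodup_cons] at h
    obtain ⟨hp, hrest⟩ := h
    rw [List.filter_cons]
    by_cases hk : k' = k
    · subst hk
      have hnil : rest.filter (fun p => p.1 == k') = [] := by
        apply List.filter_eq_nil_iff.mpr
        intro q hq
        simp only [Bool.not_eq_true, beq_eq_false_iff_ne]
        intro h
        exact hp (h ▸ (List.mem_map.mpr ⟨q, hq, rfl⟩))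
      simp [hnil, PySem.Dict.getD, PySem.Dict.get?_mk_cons]
    · rw [if_neg (by simpa using hk)]
      rw [ih hrest]
      simp [PySem.Dict.getD, PySem.Dict.get?_mk_cons, hk]

-- Removing all pairs with key k does not change lookups at other keys.
theorem pv_getD_filter (k x : String) (hx : x ≠ k) (l : List (String × Int)) :
    (PySem.Dict.mk (l.filter (fun p => p.1 != k))).getD x 0 = (PySem.Dict.mk l).getD x 0 := by
  induction l with
  | nil => rfl
  | cons p rest ih =>
    obtain ⟨k', v'⟩ := p
    rw [List.filter_cons]
    by_cases hk : k' = k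
    · subst hk
      rw [if_neg (by simp)]
      rw [ih]
      simp [PySem.Dict.getD, PySem.Dict.get?_mk_cons, Ne.symm hx]
    · rw [if_pos (by simpa using hk)]
      by_cases hx' : k' = x
      · simp [PySem.Dict.getD, PySem.Dict.get?_mk_cons, hx']
      · simp only [PySem.Dict.getD, PySem.Dict.get?_mk_cons,
                   show (k' == x) = false from by simpa using hx']
        exact ih

-- B's sweep, started disjointly from res, on pairs c1 ++ c2 with duplicate-free key lists:
-- it appends c1's entries augmented by c2's sums, then c2's fresh entries.
theorem pv_sweep (c1 : List (String × Int)) (c2 : List (String × Int))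
    (h1 : (c1.map Prod.fst).Nodup) (h2 : (c2.map Prod.fst).Nodup)
    (res : PySem.Dict String Int) (hres : res.keys.Nodup)
    (hd1 : ∀ p ∈ c1, res.contains p.1 = false) (hd2 : ∀ p ∈ c2, res.contains p.1 = false) :
    (pvGroupSum (c1 ++ c2) res).items
      = res.items ++ c1.map (fun q => (q.1, q.2 + (PySem.Dict.mk c2).getD q.1 0))
        ++ c2.filter (fun p => !((PySem.Dict.mk c1).contains p.1)) := by
  induction c1 generalizing c2 res with
  | nil =>
    simp only [List.nil_append, List.map_nil]
    have hfull : c2.filter (fun p => !((PySem.Dict.mk ([] : List (String × Int))).contains p.1)) = c2 := by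
      apply List.filter_eq_self.mpr
      intro q hq
      simp [show (PySem.Dict.mk ([] : List (String × Int))) = PySem.Dict.empty from rfl,
            PySem.Dict.contains_empty]
    rw [hfull]
    -- run on a duplicate-free disjoint list appends it unchanged
    clear hfull hd1
    induction c2 generalizing res with
    | nil => simp [pvGroupSum]
    | cons p rest ih =>
      obtain ⟨k, v⟩ := p
      simp only [List.map_cons, List.nodup_cons] at h2
      obtain ⟨hp, hrest⟩ := h2
      have hknotin : ∀ q ∈ rest, q.1 ≠ k := by
        intro q hq h
        exact hp (h ▸ (List.mem_map.mpr ⟨q, hq, rfl⟩))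
      have hfilne : rest.filter (fun p => p.1 != k) = rest := by
        apply List.filter_eq_self.mpr
        intro q hq
        simpa using hknotin q hq
      have hfileq : rest.filter (fun p => p.1 == k) = [] := by
        apply List.filter_eq_nil_iff.mpr
        intro q hq
        simpa using hknotin q hq
      have hck : res.contains k = false := hd2 (k, v) (by simp)
      rw [pvGroupSum, hfilne, hfileq]
      simp only [List.map_nil, List.sum_nil, add_zero]
      have hknres : ¬ k ∈ res.keys := by
        simpa [PySem.Dict.contains_eq_decide_mem_keys] using hck
      have hres' : (res.insert k v).keys.Nodup := by
        rw [PySem.Dict.keys_insert_of_not_contains _ _ hck]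
        exact List.Nodup.append hres (List.nodup_singleton _)
          (by intro a ha hb; simp at hb; subst hb; exact hknres ha)
      rw [ih hrest _ hres' (by
        intro q hq
        rw [PySem.Dict.contains_insert]
        simp only [Bool.or_eq_false_iff]
        exact ⟨by simpa using hknotin q hq, hd2 q (by simp [hq])⟩)]
      rw [PySem.Dict.items_insert_of_not_contains _ _ hck]
      simp
  | cons p c1' ih =>
    obtain ⟨k, v⟩ := p
    simp only [List.map_cons, List.nodup_cons] at h1
    obtain ⟨hp, hc1'⟩ := h1
    have hknotin : ∀ q ∈ c1', q.1 ≠ k := by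
      intro q hq h
      exact hp (h ▸ (List.mem_map.mpr ⟨q, hq, rfl⟩))
    rw [List.cons_append, pvGroupSum]
    -- the sum over the tail comes only from c2
    have hfil1 : c1'.filter (fun p => p.1 == k) = [] := by
      apply List.filter_eq_nil_iff.mpr
      intro q hq
      simpa using hknotin q hq
    have hfil1' : c1'.filter (fun p => p.1 != k) = c1' := by
      apply List.filter_eq_self.mpr
      intro q hq
      simpa using hknotin q hq
    have hsum : ((((c1' ++ c2).filter (fun p => p.1 == k)).map Prod.snd).sum)
        = (PySem.Dict.mk c2).getD k 0 := by
      rw [List.filter_append, hfil1, List.nil_append]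
      exact pv_sum_getD k c2 h2
    rw [List.filter_append, hfil1', hsum]
    -- apply the IH to c1' and the filtered c2
    have h2' : ((c2.filter (fun p => p.1 != k)).map Prod.fst).Nodup :=
      List.Nodup.sublist ((List.filter_sublist (l := c2)).map Prod.fst) h2
    have hck : res.contains k = false := hd1 (k, v) (by simp)
    have hknres : ¬ k ∈ res.keys := by
      simpa [PySem.Dict.contains_eq_decide_mem_keys] using hck
    have hres' : (res.insert k ((v + (PySem.Dict.mk c2).getD k 0))).keys.Nodup := by
      rw [PySem.Dict.keys_insert_of_not_contains _ _ hck]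
      exact List.Nodup.append hres (List.nodup_singleton _)
        (by intro a ha hb; simp at hb; subst hb; exact hknres ha)
    rw [ih (c2.filter (fun p => p.1 != k)) hc1' h2' _ hres'
      (by
        intro q hq
        rw [PySem.Dict.contains_insert]
        simp only [Bool.or_eq_false_iff]
        exact ⟨by simpa using hknotin q hq, hd1 q (by simp [hq])⟩)
      (by
        intro q hq
        have hqk : q.1 ≠ k := by simpa using (List.of_mem_filter hq)
        rw [PySem.Dict.contains_insert]
        simp only [Bool.or_eq_false_iff]
        exact ⟨by simpa using hqk, hd2 q (List.mem_of_mem_filter hq)⟩)]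
    rw [PySem.Dict.items_insert_of_not_contains _ _ hck]
    -- rewrite the map over c1' back to lookups in the unfiltered c2
    have hmap : c1'.map (fun q => (q.1, q.2 + (PySem.Dict.mk (c2.filter (fun p => p.1 != k))).getD q.1 0))
        = c1'.map (fun q => (q.1, q.2 + (PySem.Dict.mk c2).getD q.1 0)) := by
      apply List.map_congr_left
      intro q hq
      rw [pv_getD_filter k q.1 (hknotin q hq) c2]
    -- merge the two filters on c2 into the single freshness filter
    have hfilter : (c2.filter (fun p => p.1 != k)).filter (fun p => !((PySem.Dict.mk c1').contains p.1))
        = c2.filter (fun p => !((PySem.Dict.mk ((k, v) :: c1')).contains p.1)) := by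
      rw [List.filter_filter]
      apply List.filter_congr
      intro q hq
      by_cases hqk : q.1 = k
      · simp [PySem.Dict.contains_eq_decide_mem_keys, PySem.Dict.keys, hqk]
      · by_cases hqm : q.1 ∈ c1'.map Prod.fst
        · simp [PySem.Dict.contains_eq_decide_mem_keys, PySem.Dict.keys, hqk, hqm]
        · simp [PySem.Dict.contains_eq_decide_mem_keys, PySem.Dict.keys, hqk, hqm]
    rw [hmap, hfilter]
    simp

-- ===== VERDICT (by name: the statement is the Claim_ definition above) =====
theorem add_counters_spec : Claim_equal_add_counters := by
  intro c1 c2 _ hpre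
  obtain ⟨h1, h2⟩ := hpre
  show add_counters c1 c2 = add_counters_alt c1 c2
  unfold add_counters add_counters_alt
  dsimp only
  have hnd1 : (PySem.Dict.mk c1 : PySem.Dict String Int).keys.Nodup := by
    simpa [PySem.Dict.keys] using h1
  rw [pv_loop1 c1 h1, pv_loop2 c2 _ h2 hnd1]
  rw [pv_sweep c1 c2 h1 h2 PySem.Dict.empty (by simp [PySem.Dict.keys_empty])
        (by intro q _; exact PySem.Dict.contains_empty _)
        (by intro q _; exact PySem.Dict.contains_empty _)]
  simp [show (PySem.Dict.empty : PySem.Dict String Int).items = [] from rfl]
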